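-- pv_equiv track=rewrite | github.com/Sangyu-Han/SpecLens | scripts/build_clip_circuit.py | _resolve_stop_grad_map
-- ===== SOURCE A (Python) =====
-- from typing import Any, Dict, Iterable, List, Sequence
--
-- def _resolve_stop_grad_map(entries: Sequence[str]) -> Dict[str, List[str]]:
--     """
--     Parse stop-grad overrides of the form 'dst=src1,src2'.
--     """
--     mapping: Dict[str, List[str]] = {}
--     for raw in entries or []:
--         if "=" not in raw:
--             continue
--         dst, srcs = raw.split("=", 1)
--         dst = dst.strip()
--         if not dst:
--             continue
--         src_list = [s.strip() for s in srcs.split(",") if s.strip()]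
--         if not src_list:
--             continue
--         mapping.setdefault(dst, [])
--         for src in src_list:
--             if src not in mapping[dst]:
--                 mapping[dst].append(src)
--     return mapping
-- ===== SOURCE B (Python) =====
-- from typing import Dict, List, Sequence
--
--
-- def _resolve_stop_grad_map(entries: Sequence[str]) -> Dict[str, List[str]]:
--     """
--     Parse stop-grad overrides of the form 'dst=src1,src2'.
--     Build-then-dedup: flatten all entries into (dst, src) pairs, group them,
--     then deduplicate each group in one final pass.
--     """
--     pairs: List[tuple] = []
--     for raw in entries or []:
--         if "=" not in raw:
--             continue
--         dst, srcs = raw.split("=", 1)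
--         dst = dst.strip()
--         if dst:
--             pairs += [(dst, s.strip()) for s in srcs.split(",") if s.strip()]
--     grouped: Dict[str, List[str]] = {}
--     for dst, src in pairs:
--         grouped[dst] = grouped.get(dst, []) + [src]
--     return {dst: list(dict.fromkeys(srcs)) for dst, srcs in grouped.items()}
-- ===== Notes on version B (the rewrite author's own statement) =====
-- stated objective: alternative
-- what changed: A deduplicates while scanning (an inner 'not in' membership check before each append into the dict value); B first flattens all entries into a flat (dst, src) pair list, then groups the pairs, and deduplicates each group in a separate final pass with dict.fromkeys.
import Mathlib
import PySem

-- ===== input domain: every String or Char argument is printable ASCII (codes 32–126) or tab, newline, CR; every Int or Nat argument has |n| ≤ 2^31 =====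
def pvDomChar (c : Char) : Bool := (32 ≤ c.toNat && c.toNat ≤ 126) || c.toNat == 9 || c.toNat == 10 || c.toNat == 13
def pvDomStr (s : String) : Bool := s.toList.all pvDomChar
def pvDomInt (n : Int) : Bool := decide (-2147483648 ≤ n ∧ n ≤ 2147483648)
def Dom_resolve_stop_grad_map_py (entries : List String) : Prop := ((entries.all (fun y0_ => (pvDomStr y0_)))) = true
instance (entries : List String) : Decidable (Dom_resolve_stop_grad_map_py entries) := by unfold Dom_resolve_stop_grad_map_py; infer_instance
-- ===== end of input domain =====

-- B replaces A's dedup-while-scanning (inner 'not in' check on the dict value) by a flat pair list,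
-- a grouping fold, and a separate final dedup pass per key (alternative decomposition, same cost).


-- ===== PORT A =====
-- inner loop: 'for src in src_list: if src not in mapping[dst]: mapping[dst].append(src)'
-- (mapping[dst] always present here thanks to the preceding setdefault, so getD is exact)
def aInner (dst : String) (m : PySem.Dict String (List String)) (src : String) :
    PySem.Dict String (List String) :=
  if (m.getD dst []).contains src then m
  else m.insert dst (m.getD dst [] ++ [src])

-- one iteration of A's 'for raw in entries' loop
def aEntry (mapping : PySem.Dict String (List String)) (raw : String) :
    PySem.Dict String (List String) :=
  if PySem.Str.isIn "=" raw then
    match PySem.Str.splitMax? raw "=" 1 with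
    | some (dst0 :: srcs :: _) =>
      let dst := PySem.Str.strip dst0
      if dst = "" then mapping
      else
        let src_list := (((PySem.Str.split? srcs ",").getD []).map PySem.Str.strip).filter
          (fun s => s ≠ "")
        if src_list = [] then mapping
        else src_list.foldl (aInner dst) (mapping.setdefault dst [])
    | _ => mapping  -- unreachable: split('=',1) with '=' in raw yields two pieces
  else mapping

def resolve_stop_grad_map_py (entries : List String) : List (String × List String) :=
  (entries.foldl aEntry PySem.Dict.empty).items

-- ===== PORT B =====
-- one iteration of B's pair-collecting loop
def bEntry (acc : List (String × String)) (raw : String) : List (String × String) :=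
  if PySem.Str.isIn "=" raw then
    match PySem.Str.splitMax? raw "=" 1 with
    | some (dst0 :: srcs :: _) =>
      let dst := PySem.Str.strip dst0
      if dst = "" then acc
      else acc ++ ((((PySem.Str.split? srcs ",").getD []).map PySem.Str.strip).filter
        (fun s => s ≠ "")).map (fun s => (dst, s))
    | _ => acc
  else acc

-- grouping step: grouped[dst] = grouped.get(dst, []) + [src]
def bGroup (d : PySem.Dict String (List String)) (p : String × String) :
    PySem.Dict String (List String) :=
  d.insert p.1 (d.getD p.1 [] ++ [p.2])

def resolve_stop_grad_map_py_alt (entries : List String) : List (String × List String) :=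
  ((entries.foldl bEntry []).foldl bGroup PySem.Dict.empty).items.map
    (fun p => (p.1, PySem.List.dedup p.2))

-- ===== PRECONDITION & SPEC =====
def Spec_resolve_stop_grad_map_py (entries : List String) (out : List (String × List String)) : Prop := out = resolve_stop_grad_map_py_alt entries
instance (entries : List String) (out : List (String × List String)) : Decidable (Spec_resolve_stop_grad_map_py entries out) := by unfold Spec_resolve_stop_grad_map_py; infer_instance

-- ===== CLAIM (what is proved, stated in full; the proofs are below) =====
def Claim_equal_resolve_stop_grad_map_py : Prop := ∀ (entries : List String), Dom_resolve_stop_grad_map_py entries → Spec_resolve_stop_grad_map_py entries (resolve_stop_grad_map_py entries)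

-- ===== LEMMAS AND PROOFS =====

-- map dedup over every value of a dict
def dd (m : PySem.Dict String (List String)) : PySem.Dict String (List String) :=
  PySem.Dict.mk (m.items.map (fun p => (p.1, PySem.List.dedup p.2)))

lemma dd_items (m : PySem.Dict String (List String)) :
    (dd m).items = m.items.map (fun p => (p.1, PySem.List.dedup p.2)) := rfl

lemma dd_contains (m : PySem.Dict String (List String)) (k : String) :
    (dd m).contains k = m.contains k := by
  simp only [dd, PySem.Dict.contains, List.any_map]
  rfl

lemma dd_keys (m : PySem.Dict String (List String)) : (dd m).keys = m.keys := by
  simp [dd, PySem.Dict.keys, List.map_map, Function.comp]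

lemma dd_get? (m : PySem.Dict String (List String)) (k : String) :
    (dd m).get? k = (m.get? k).map PySem.List.dedup := by
  simp only [dd, PySem.Dict.get?, List.find?_map, Option.map_map]
  rfl

lemma dd_insert (m : PySem.Dict String (List String)) (k : String) (w : List String) :
    dd (m.insert k w) = (dd m).insert k (PySem.List.dedup w) := by
  apply PySem.Dict.ext
  rw [dd_items, PySem.Dict.items_insert, PySem.Dict.items_insert, dd_contains, dd_items]
  by_cases hc : m.contains k = true
  · rw [if_pos hc, if_pos hc, List.map_map, List.map_map]
    apply List.map_congr_left
    intro p _
    by_cases hk : p.1 = k <;> simp [Function.comp, hk]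
  · rw [if_neg hc, if_neg hc, List.map_append]
    rfl

lemma boolFalse {b : Bool} (h : ¬ b = true) : b = false := by
  cases b
  · rfl
  · exact absurd rfl h

lemma dd_setdefault (m : PySem.Dict String (List String)) (k : String) :
    (dd m).setdefault k [] = dd (m.setdefault k []) := by
  have hdc := dd_contains m k
  by_cases hc : m.contains k = true
  · rw [PySem.Dict.setdefault_of_contains _ _ (hdc.trans hc),
      PySem.Dict.setdefault_of_contains _ _ hc]
  · have hf : m.contains k = false := boolFalse hc
    rw [PySem.Dict.setdefault_of_not_contains _ _ (hdc.trans hf),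
      PySem.Dict.setdefault_of_not_contains _ _ hf, dd_insert]
    rfl

lemma insert_self_of_get? (m : PySem.Dict String (List String)) (k : String) (v : List String)
    (hn : m.keys.Nodup) (h : m.get? k = some v) : m.insert k v = m := by
  apply PySem.Dict.ext
  have hc : m.contains k = true := by rw [PySem.Dict.contains_eq_isSome_get?, h]; rfl
  rw [PySem.Dict.items_insert, if_pos hc]
  conv_rhs => rw [← List.map_id m.items]
  apply List.map_congr_left
  intro p hp
  obtain ⟨p1, p2⟩ := p
  by_cases hk : p1 = k
  · subst hk
    have h2 : m.get? p1 = some p2 := PySem.Dict.get?_of_mem_items m hp hn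
    rw [h] at h2
    simp [Option.some_inj.mp h2]
  · simp [hk]

lemma dedup_snoc (v : List String) (s : String) :
    PySem.List.dedup (v ++ [s]) =
      if v.contains s then PySem.List.dedup v else PySem.List.dedup v ++ [s] := by
  have h := PySem.Set.ofList_append v [s]
  simp [PySem.List.dedup, h, PySem.Set.update, PySem.Set.add]

lemma contains_dedup (v : List String) (s : String) :
    (PySem.List.dedup v).contains s = v.contains s := by
  by_cases hm : s ∈ v <;> simp [List.contains_eq_mem, hm]

-- key step: A's conditional append on the deduped dict mirrors B's unconditional append
lemma aInner_dd (m : PySem.Dict String (List String)) (dst s : String)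
    (hn : m.keys.Nodup) (hc : m.contains dst = true) :
    aInner dst (dd m) s = dd (bGroup m (dst, s)) := by
  obtain ⟨v, hv⟩ : ∃ v, m.get? dst = some v := by
    rw [PySem.Dict.contains_eq_isSome_get?] at hc
    exact Option.isSome_iff_exists.mp hc
  have hgd : (dd m).getD dst [] = PySem.List.dedup v :=
    PySem.Dict.getD_of_get?_eq_some _ _ (by rw [dd_get?, hv]; rfl)
  have hgd' : m.getD dst [] = v := PySem.Dict.getD_of_get?_eq_some _ _ hv
  unfold aInner bGroup
  rw [hgd, hgd', dd_insert, dedup_snoc, contains_dedup]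
  by_cases hs : v.contains s = true
  · rw [if_pos hs, if_pos hs]
    exact (insert_self_of_get? (dd m) dst (PySem.List.dedup v)
      (by rw [dd_keys]; exact hn) (by rw [dd_get?, hv]; rfl)).symm
  · simp only [Bool.not_eq_true] at hs
    rw [hs]
    simp

-- B's grouping keeps keys nodup and (once dst is present) dst present
lemma inner_eq (dst : String) (xs : List String) (m : PySem.Dict String (List String))
    (hn : m.keys.Nodup) (hc : m.contains dst = true) :
    xs.foldl (aInner dst) (dd m) = dd (xs.foldl (fun d s => bGroup d (dst, s)) m) := by
  induction xs generalizing m with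
  | nil => rfl
  | cons s rest ih =>
    simp only [List.foldl_cons]
    rw [aInner_dd m dst s hn hc]
    exact ih (bGroup m (dst, s))
      (PySem.Dict.nodup_keys_insert _ _ _ hn)
      (PySem.Dict.contains_insert_self _ _ _)

lemma bGroup_setdefault (m : PySem.Dict String (List String)) (dst s : String) :
    bGroup (m.setdefault dst []) (dst, s) = bGroup m (dst, s) := by
  by_cases hc : m.contains dst = true
  · rw [PySem.Dict.setdefault_of_contains _ _ hc]
  · rw [PySem.Dict.setdefault_of_not_contains _ _ (by simp [hc])]
    unfold bGroup
    rw [PySem.Dict.insert_insert_self,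
      PySem.Dict.getD_of_get?_eq_some _ _ (PySem.Dict.get?_insert_self _ _ _),
      PySem.Dict.getD_of_not_contains _ _ (boolFalse hc)]

lemma nodup_setdefault (m : PySem.Dict String (List String)) (dst : String)
    (hn : m.keys.Nodup) : (m.setdefault dst []).keys.Nodup := by
  rw [PySem.Dict.keys_setdefault]
  by_cases hc : m.contains dst = true
  · rw [if_pos hc]; exact hn
  · rw [if_neg hc]
    refine List.Nodup.append hn (List.nodup_singleton dst) ?_
    intro a ha hb
    rw [List.mem_singleton] at hb
    subst hb
    exact hc (by rw [PySem.Dict.contains_iff_mem_keys]; exact ha)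

lemma branch_eq (m : PySem.Dict String (List String)) (hn : m.keys.Nodup)
    (dst : String) (sl : List String) (he : sl ≠ []) :
    sl.foldl (aInner dst) ((dd m).setdefault dst []) =
      dd (sl.foldl (fun d s => bGroup d (dst, s)) m) := by
  cases sl with
  | nil => exact absurd rfl he
  | cons s0 tl =>
    rw [dd_setdefault,
      inner_eq dst (s0 :: tl) (m.setdefault dst [])
        (nodup_setdefault m dst hn)
        (by rw [PySem.Dict.contains_setdefault]; simp),
      List.foldl_cons, List.foldl_cons, bGroup_setdefault]

lemma entry_eq (m : PySem.Dict String (List String)) (hn : m.keys.Nodup) (raw : String) :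
    aEntry (dd m) raw = dd ((bEntry [] raw).foldl bGroup m) := by
  unfold aEntry bEntry
  by_cases hin : PySem.Str.isIn "=" raw = true
  · rw [if_pos hin, if_pos hin]
    cases hsp : PySem.Str.splitMax? raw "=" 1 with
    | none => rfl
    | some parts =>
      match parts with
      | [] => rfl
      | [_] => rfl
      | dst0 :: srcs :: rest =>
        simp only
        by_cases hd : PySem.Str.strip dst0 = ""
        · rw [if_pos hd, if_pos hd]; rfl
        · rw [if_neg hd, if_neg hd]
          set dst := PySem.Str.strip dst0 with hdst
          set sl := (((PySem.Str.split? srcs ",").getD []).map PySem.Str.strip).filter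
            (fun s => s ≠ "") with hsl
          by_cases he : sl = []
          · rw [if_pos he, he]; rfl
          · rw [if_neg he]
            simp only [List.nil_append, List.foldl_map]
            exact branch_eq m hn dst sl he
  · rw [if_neg hin, if_neg hin]; rfl

lemma main_fold (entries : List String) (m : PySem.Dict String (List String))
    (hn : m.keys.Nodup) :
    entries.foldl aEntry (dd m) =
      dd (entries.foldl (fun d raw => (bEntry [] raw).foldl bGroup d) m) := by
  induction entries generalizing m with
  | nil => rfl
  | cons raw rest ih =>
    simp only [List.foldl_cons]
    rw [entry_eq m hn raw]
    refine ih _ ?_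
    -- keys stay nodup through a bGroup fold
    have : ∀ (ps : List (String × String)) (d : PySem.Dict String (List String)),
        d.keys.Nodup → (ps.foldl bGroup d).keys.Nodup := by
      intro ps
      induction ps with
      | nil => intro d h; exact h
      | cons p pr ihp =>
        intro d h
        exact ihp _ (PySem.Dict.nodup_keys_insert _ _ _ h)
    exact this _ _ hn

lemma bEntry_shift (acc : List (String × String)) (raw : String) :
    bEntry acc raw = acc ++ bEntry [] raw := by
  unfold bEntry
  by_cases hin : PySem.Str.isIn "=" raw = true
  · rw [if_pos hin, if_pos hin]
    cases hsp : PySem.Str.splitMax? raw "=" 1 with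
    | none => simp
    | some parts =>
      match parts with
      | [] => simp
      | [_] => simp
      | dst0 :: srcs :: rest =>
        simp only
        by_cases hd : PySem.Str.strip dst0 = "" <;> simp [hd]
  · rw [if_neg hin, if_neg hin]; simp

lemma pairs_flat (entries : List String) (acc : List (String × String)) :
    entries.foldl bEntry acc = acc ++ entries.flatMap (bEntry []) := by
  induction entries generalizing acc with
  | nil => simp
  | cons raw rest ih =>
    simp only [List.foldl_cons, List.flatMap_cons]
    rw [bEntry_shift, ih, List.append_assoc]

lemma group_flat (entries : List String) (d : PySem.Dict String (List String)) :
    (entries.flatMap (bEntry [])).foldl bGroup d =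
      entries.foldl (fun d raw => (bEntry [] raw).foldl bGroup d) d := by
  induction entries generalizing d with
  | nil => rfl
  | cons raw rest ih =>
    simp only [List.flatMap_cons, List.foldl_append, List.foldl_cons]
    exact ih _

lemma equal_all (entries : List String) :
    resolve_stop_grad_map_py entries = resolve_stop_grad_map_py_alt entries := by
  unfold resolve_stop_grad_map_py resolve_stop_grad_map_py_alt
  have h0 : (PySem.Dict.empty : PySem.Dict String (List String)) = dd PySem.Dict.empty := rfl
  rw [h0, main_fold entries PySem.Dict.empty (by simp [PySem.Dict.keys_empty]),
    pairs_flat entries [], List.nil_append, group_flat]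
  rfl

-- ===== VERDICT (by name: the statement is the Claim_ definition above) =====
theorem resolve_stop_grad_map_py_spec : Claim_equal_resolve_stop_grad_map_py := by
  intro entries _
  exact equal_all entries
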